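-- pv_equiv track=rewrite | github.com/sparkyuniverzum/Sparky_universe | universe/telemetry.py | _resolve_module
-- ===== SOURCE A (Python) =====
-- from typing import Any, Dict, Iterable, List, Tuple
--
-- def _resolve_module(path: str, root_path: str, mount_map: Dict[str, str]) -> str:
--     root_path = root_path.rstrip("/")
--     if root_path and root_path in mount_map:
--         return mount_map[root_path]
--
--     if not path.startswith("/"):
--         path = "/" + path
--     for mount in sorted(mount_map.keys(), key=len, reverse=True):
--         if path == mount or path.startswith(f"{mount}/"):
--             return mount_map[mount]
--     return "universe"
-- ===== SOURCE B (Python) =====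
-- def _resolve_module(path, root_path, mount_map):
--     root_path = root_path.rstrip("/")
--     if root_path and root_path in mount_map:
--         return mount_map[root_path]
--
--     if not path.startswith("/"):
--         path = "/" + path
--     # Longest-prefix match: try the whole path, then every prefix ending
--     # just before a '/', from longest to shortest, with direct dict lookups.
--     if path in mount_map:
--         return mount_map[path]
--     for i in range(len(path) - 1, -1, -1):
--         if path[i] == "/":
--             cand = path[:i]
--             if cand in mount_map:
--                 return mount_map[cand]
--     return "universe"
-- ===== Notes on version B (the rewrite author's own statement) =====
-- stated objective: alternative
-- what changed: Instead of sorting all mount keys by length and scanning them with startswith tests, B enumerates the path's own '/'-delimited prefixes from longest to shortest and does a direct dict lookup on each, returning the first hit.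
import Mathlib
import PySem

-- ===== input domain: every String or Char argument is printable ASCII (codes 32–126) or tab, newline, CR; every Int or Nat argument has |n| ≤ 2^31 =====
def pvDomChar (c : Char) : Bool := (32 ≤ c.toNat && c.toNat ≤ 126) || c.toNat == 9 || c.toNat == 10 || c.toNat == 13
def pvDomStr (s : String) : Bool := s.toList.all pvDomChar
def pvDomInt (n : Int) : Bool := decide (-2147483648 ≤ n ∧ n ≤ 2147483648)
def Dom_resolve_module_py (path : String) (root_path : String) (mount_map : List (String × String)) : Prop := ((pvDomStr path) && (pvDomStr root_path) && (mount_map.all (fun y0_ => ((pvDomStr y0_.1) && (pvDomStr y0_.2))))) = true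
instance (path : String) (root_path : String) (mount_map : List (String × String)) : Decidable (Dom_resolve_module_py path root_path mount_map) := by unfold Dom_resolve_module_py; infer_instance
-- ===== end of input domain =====

-- B replaces A's sort-all-mount-keys-and-scan with direct dict lookups on the path's own
-- '/'-delimited prefixes, longest first (different traversal, no sort); same return value.

-- ===== PORT A =====
-- root_path.rstrip("/"): hand-ported (PySem has no one-sided strip with a chars argument);
-- exact: drops exactly the trailing '/' characters.
def pvRstripSlash (s : String) : String :=
  String.ofList ((s.toList.reverse.dropWhile (fun c => c == '/')).reverse)

-- the 'for mount in sorted(...)' loop; 'mount_map[mount]' is d.getD m "" (mount is always a key)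
def pvLoopA (path : String) (d : PySem.Dict String String) : List String → String
  | [] => "universe"
  | m :: rest =>
      if path == m || PySem.Str.startswith path (m ++ "/") then d.getD m ""
      else pvLoopA path d rest

def resolve_module_py (path : String) (root_path : String) (mount_map : List (String × String)) : String :=
  let d : PySem.Dict String String := PySem.Dict.ofList mount_map
  let rp := pvRstripSlash root_path
  if (!(rp == "")) && d.contains rp then d.getD rp ""
  else
    let p := if PySem.Str.startswith path "/" then path else "/" ++ path
    pvLoopA p d (PySem.List.sorted d.keys (fun m => PySem.Str.len m) true)

-- ===== PORT B =====
-- the 'for i in range(len(path)-1, -1, -1)' loop of B; the Nat argument is i+1, so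
-- index i = n is inspected first; path[i] is cs.getD n ' ' (always in range), path[:i] is cs.take n
def pvLoopB (cs : List Char) (d : PySem.Dict String String) : Nat → String
  | 0 => "universe"
  | n+1 =>
      if cs.getD n ' ' == '/' then
        match d.get? (String.ofList (cs.take n)) with
        | some v => v
        | none => pvLoopB cs d n
      else pvLoopB cs d n

def resolve_module_py_alt (path : String) (root_path : String) (mount_map : List (String × String)) : String :=
  let d : PySem.Dict String String := PySem.Dict.ofList mount_map
  let rp := pvRstripSlash root_path
  if (!(rp == "")) && d.contains rp then d.getD rp ""
  else
    let p := if PySem.Str.startswith path "/" then path else "/" ++ path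
    match d.get? p with
    | some v => v
    | none => pvLoopB p.toList d p.toList.length

-- ===== PRECONDITION & SPEC =====
def Spec_resolve_module_py (path : String) (root_path : String) (mount_map : List (String × String)) (out : String) : Prop := out = resolve_module_py_alt path root_path mount_map
instance (path : String) (root_path : String) (mount_map : List (String × String)) (out : String) : Decidable (Spec_resolve_module_py path root_path mount_map out) := by unfold Spec_resolve_module_py; infer_instance

-- ===== CLAIM (what is proved, stated in full; the proofs are below) =====
def Claim_equal_resolve_module_py : Prop := ∀ (path : String) (root_path : String) (mount_map : List (String × String)), Dom_resolve_module_py path root_path mount_map → Spec_resolve_module_py path root_path mount_map (resolve_module_py path root_path mount_map)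

-- ===== LEMMAS AND PROOFS =====

-- the candidate prefixes B's loop tries, in order (index i = n-1 first)
def pvCands (cs : List Char) : Nat → List (List Char)
  | 0 => []
  | n+1 => if cs.getD n ' ' == '/' then cs.take n :: pvCands cs n else pvCands cs n

lemma mem_pvCands (cs ms : List Char) (n : Nat) :
    ms ∈ pvCands cs n ↔ ∃ i < n, cs.getD i ' ' = '/' ∧ ms = cs.take i := by
  induction n with
  | zero => simp [pvCands]
  | succ n ih =>
    simp only [pvCands]
    split
    · rename_i h
      simp only [List.mem_cons, ih]
      constructor
      · rintro (rfl | ⟨i, hi, hs, rfl⟩)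
        · exact ⟨n, by omega, by simpa using h, rfl⟩
        · exact ⟨i, by omega, hs, rfl⟩
      · rintro ⟨i, hi, hs, rfl⟩
        by_cases hin : i = n
        · subst hin; exact Or.inl rfl
        · exact Or.inr ⟨i, by omega, hs, rfl⟩
    · rename_i h
      rw [ih]
      constructor
      · rintro ⟨i, hi, hs, rfl⟩; exact ⟨i, by omega, hs, rfl⟩
      · rintro ⟨i, hi, hs, rfl⟩
        refine ⟨i, ?_, hs, rfl⟩
        by_cases hin : i = n
        · subst hin
          simp only [List.getD] at hs h
          simp [hs] at h
        · omega

lemma pvCands_len (cs : List Char) (n : Nat) (hn : n ≤ cs.length)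
    (x : List Char) (hx : x ∈ pvCands cs n) : x = cs.take x.length ∧ x.length < n := by
  rw [mem_pvCands] at hx
  obtain ⟨i, hi, hs, rfl⟩ := hx
  have hl : (cs.take i).length = i := by simp; omega
  rw [hl]
  exact ⟨rfl, by omega⟩

lemma pvC_take (cs : List Char) (x : List Char)
    (hx : x ∈ cs :: pvCands cs cs.length) : x = cs.take x.length := by
  rcases List.mem_cons.mp hx with rfl | hx
  · simp
  · exact (pvCands_len cs cs.length le_rfl x hx).1

lemma pvC_pairwise (cs : List Char) :
    (cs :: pvCands cs cs.length).Pairwise (fun a b => b.length < a.length) := by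
  have key : ∀ n, n ≤ cs.length → (pvCands cs n).Pairwise (fun a b => b.length < a.length) := by
    intro n
    induction n with
    | zero => intro _; simp [pvCands]
    | succ n ih =>
      intro hn
      simp only [pvCands]
      split
      · refine List.Pairwise.cons ?_ (ih (by omega))
        intro x hx
        have := pvCands_len cs n (by omega) x hx
        have : x.length < n := this.2
        simpa [List.length_take, Nat.min_eq_left (by omega : n ≤ cs.length)] using this
      · exact ih (by omega)
  refine List.Pairwise.cons ?_ (key cs.length le_rfl)
  intro x hx
  exact (pvCands_len cs cs.length le_rfl x hx).2

lemma pvPrefix_iff (cs ms : List Char) :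
    (ms ++ ['/']) <+: cs ↔ ∃ i < cs.length, cs.getD i ' ' = '/' ∧ ms = cs.take i := by
  constructor
  · intro h
    have hlen : ms.length + 1 ≤ cs.length := by
      have := h.length_le; simpa using this
    refine ⟨ms.length, by omega, ?_, ?_⟩
    · have hg := h.getElem (i := ms.length) (by simp)
      have h2 : (ms ++ ['/'])[ms.length]'(by simp) = '/' := by
        simp
      rw [List.getD_eq_getElem cs ' ' (by omega)]
      exact hg ▸ h2
    · have : ms <+: cs := (List.prefix_append ms ['/']).trans h
      exact List.prefix_iff_eq_take.mp this
  · rintro ⟨i, hi, hs, rfl⟩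
    have h1 : cs.take i ++ ['/'] = cs.take (i+1) := by
      rw [List.take_succ_eq_append_getElem hi]
      congr 1
      rw [List.getD_eq_getElem cs ' ' hi] at hs
      simp [hs]
    rw [h1]
    exact List.take_prefix _ _

lemma pvBridge (p m : String) :
    (p == m || PySem.Str.startswith p (m ++ "/")) = true ↔
      m.toList ∈ p.toList :: pvCands p.toList p.toList.length := by
  have hb : (p == m) = true ↔ m.toList = p.toList := by
    rw [beq_iff_eq]
    constructor
    · rintro rfl; rfl
    · intro h
      have := congrArg String.ofList h
      simpa [String.ofList_toList] using this.symm
  have hs : (PySem.Str.startswith p (m ++ "/")) = true ↔ (m.toList ++ ['/']) <+: p.toList := by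
    rw [PySem.Str.startswith_eq, PySem.Chars.startswith_iff, String.toList_append]
    have : ("/" : String).toList = ['/'] := rfl
    rw [this]
  rw [List.mem_cons, mem_pvCands, Bool.or_eq_true, hb, hs, pvPrefix_iff]

lemma pvLoopA_eq (path : String) (d : PySem.Dict String String) (l : List String) :
    pvLoopA path d l =
      match l.find? (fun m => path == m || PySem.Str.startswith path (m ++ "/")) with
      | some m => d.getD m ""
      | none => "universe" := by
  induction l with
  | nil => simp [pvLoopA]
  | cons m rest ih =>
    cases h : (path == m || PySem.Str.startswith path (m ++ "/")) with
    | true =>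
      rw [List.find?_cons_of_pos (p := fun m => path == m || PySem.Str.startswith path (m ++ "/")) h]
      simp only [pvLoopA, if_pos h]
    | false =>
      rw [List.find?_cons_of_neg (p := fun m => path == m || PySem.Str.startswith path (m ++ "/")) (by simp only [h]; simp)]
      simp only [pvLoopA, h, Bool.false_eq_true, if_false]
      exact ih

lemma pvLoopB_eq (cs : List Char) (d : PySem.Dict String String) (n : Nat) :
    pvLoopB cs d n =
      match (pvCands cs n).find? (fun c => d.contains (String.ofList c)) with
      | some c => d.getD (String.ofList c) ""
      | none => "universe" := by
  induction n with
  | zero => simp [pvLoopB, pvCands]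
  | succ n ih =>
    cases h : (cs.getD n ' ' == '/') with
    | true =>
      simp only [pvLoopB, pvCands, h, if_true]
      rcases hg : d.get? (String.ofList (cs.take n)) with _ | v
      · have hc : d.contains (String.ofList (cs.take n)) = false := by
          rw [PySem.Dict.contains_eq_isSome_get?, hg]; rfl
        rw [List.find?_cons_of_neg (p := fun c => d.contains (String.ofList c)) (by simp only [hc]; simp)]
        exact ih
      · have hc : d.contains (String.ofList (cs.take n)) = true := by
          rw [PySem.Dict.contains_eq_isSome_get?, hg]; rfl
        rw [List.find?_cons_of_pos (p := fun c => d.contains (String.ofList c)) hc]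
        simp only []
        rw [PySem.Dict.getD_eq_get?_getD, hg]
        rfl
    | false =>
      simp only [pvLoopB, pvCands, h, Bool.false_eq_true, if_false]
      exact ih

lemma pvFind_main (p : String) (d : PySem.Dict String String) (l : List String)
    (hnd : d.keys.Nodup) (hperm : l.Perm d.keys)
    (hpair : l.Pairwise (fun a b => PySem.Str.len b ≤ PySem.Str.len a)) :
    l.find? (fun m => p == m || PySem.Str.startswith p (m ++ "/"))
      = ((p.toList :: pvCands p.toList p.toList.length).find?
          (fun c => d.contains (String.ofList c))).map String.ofList := by
  have hlnd : l.Nodup := hperm.symm.nodup hnd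
  have hmem : ∀ m : String, m ∈ l ↔ d.contains m = true := by
    intro m
    rw [PySem.Dict.contains_iff_mem_keys, hperm.mem_iff]
  rcases hfc : (p.toList :: pvCands p.toList p.toList.length).find?
      (fun c => d.contains (String.ofList c)) with _ | c
  · rw [List.find?_eq_none] at hfc
    rw [Option.map_none, List.find?_eq_none]
    intro m hm hPm
    have hmc := (pvBridge p m).mp hPm
    have := hfc m.toList hmc
    rw [String.ofList_toList] at this
    exact this ((hmem m).mp hm)
  · rw [List.find?_eq_some_iff_append] at hfc
    obtain ⟨hQc, C1, C2, hsplit, hC1⟩ := hfc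
    rw [Option.map_some, List.find?_eq_some_iff_append]
    have hcC : c ∈ p.toList :: pvCands p.toList p.toList.length := by
      rw [hsplit]; exact List.mem_append_right _ (List.mem_cons_self)
    have hcl : (String.ofList c) ∈ l := (hmem _).mpr hQc
    have hPc : (p == String.ofList c || PySem.Str.startswith p (String.ofList c ++ "/")) = true := by
      rw [pvBridge, String.toList_ofList]
      exact hcC
    refine ⟨hPc, ?_⟩
    obtain ⟨l1, l2, hl⟩ := List.append_of_mem hcl
    refine ⟨l1, l2, hl, ?_⟩
    intro m hm1
    simp only [Bool.not_eq_true']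
    by_contra hPm
    rw [Bool.not_eq_false] at hPm
    have hmc := (pvBridge p m).mp hPm
    have hml : m ∈ l := by rw [hl]; exact List.mem_append_left _ hm1
    -- lengths: m comes before (ofList c) in l, so len c ≤ len m
    have hlen : c.length ≤ m.toList.length := by
      have hp2 := hpair
      rw [hl] at hp2
      rw [List.pairwise_append] at hp2
      have := hp2.2.2 m hm1 (String.ofList c) (List.mem_cons_self)
      have h2 := this
      rw [PySem.Str.len_eq, PySem.Str.len_eq, String.toList_ofList] at h2
      exact_mod_cast h2
    rcases Nat.lt_or_ge c.length m.toList.length with hlt | hge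
    · -- m.toList is strictly longer than c, hence in C1, hence not contained: contradiction
      have hmC1 : m.toList ∈ C1 := by
        have hmC : m.toList ∈ C1 ++ c :: C2 := by rw [← hsplit]; exact hmc
        rcases List.mem_append.mp hmC with h1 | h1
        · exact h1
        · rcases List.mem_cons.mp h1 with rfl | h2
          · omega
          · -- elements of C2 are shorter than c
            have hpw := pvC_pairwise p.toList
            rw [hsplit, List.pairwise_append] at hpw
            have := (List.pairwise_cons.mp hpw.2.1).1 m.toList h2
            omega
      have := hC1 m.toList hmC1
      rw [String.ofList_toList] at this
      simp [(hmem m).mp hml] at this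
    · -- equal lengths: m.toList = c, contradicting Nodup of l
      have hlen2 : m.toList.length = c.length := by omega
      have he : m.toList = c := by
        have h1 := pvC_take p.toList m.toList hmc
        have h2 := pvC_take p.toList c hcC
        rw [h1, h2, hlen2]
      have : m = String.ofList c := by
        rw [← he, String.ofList_toList]
      rw [hl, List.nodup_append] at hlnd
      exact hlnd.2.2 m hm1 (String.ofList c) List.mem_cons_self this


-- ===== VERDICT (by name: the statement is the Claim_ definition above) =====
theorem resolve_module_py_spec : Claim_equal_resolve_module_py := by
  intro path root_path mount_map _
  unfold Spec_resolve_module_py resolve_module_py resolve_module_py_alt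
  simp only []
  set d : PySem.Dict String String := PySem.Dict.ofList mount_map with hd
  set rp := pvRstripSlash root_path with hrp
  cases hc : ((!(rp == "")) && d.contains rp) with
  | true => simp only [if_true]
  | false =>
    simp only [Bool.false_eq_true, if_false]
    set p := (if PySem.Str.startswith path "/" then path else "/" ++ path) with hp
    rw [pvLoopA_eq, pvFind_main p d _ (PySem.Dict.nodup_keys_ofList mount_map)
      (PySem.List.sorted_perm d.keys (fun m => PySem.Str.len m) true)
      (PySem.List.sorted_pairwise_rev d.keys (fun m => PySem.Str.len m))]
    rcases hg : d.get? p with _ | v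
    · have hcf : d.contains (String.ofList p.toList) = false := by
        rw [String.ofList_toList, PySem.Dict.contains_eq_isSome_get?, hg]; rfl
      rw [List.find?_cons_of_neg (p := fun c => d.contains (String.ofList c)) (by simp only [hcf]; simp)]
      rw [pvLoopB_eq]
      rcases (pvCands p.toList p.toList.length).find? (fun c => d.contains (String.ofList c)) with _ | c
      · rfl
      · rfl
    · have hct : d.contains (String.ofList p.toList) = true := by
        rw [String.ofList_toList, PySem.Dict.contains_eq_isSome_get?, hg]; rfl
      rw [List.find?_cons_of_pos (p := fun c => d.contains (String.ofList c)) hct]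
      simp only [Option.map_some]
      rw [String.ofList_toList, PySem.Dict.getD_eq_get?_getD, hg]
      rfl
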